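-- pv_equiv track=rewrite | github.com/4x3lpri3t0/algorithms-python | EPI/11-searching/02_search-entry-equal-to-index.py | search_entry_equal_to_its_index
-- ===== SOURCE A (Python) =====
-- from typing import List
--
-- def search_entry_equal_to_its_index(A: List[int], k: int) -> int:
--     left, right = 0, len(A) - 1
--     while left <= right:
--         mid = (left + right) // 2
--         difference = A[mid] - mid
--         # A[mid] == mid if and only if difference == 0.
--         if difference == 0:
--             return mid
--         elif difference > 0:
--             right = mid - 1
--         else: # difference < 0.
--             left = mid + 1
--     return -1
-- ===== SOURCE B (Python) =====
-- from typing import List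
--
-- def search_entry_equal_to_its_index(A: List[int], k: int) -> int:
--     diffs = [a - i for i, a in enumerate(A)]
--
--     def go(seg: List[int], offset: int) -> int:
--         if not seg:
--             return -1
--         m = (len(seg) - 1) // 2
--         d = seg[m]
--         if d == 0:
--             return offset + m
--         if d > 0:
--             return go(seg[:m], offset)
--         return go(seg[m + 1:], offset + m + 1)
--
--     return go(diffs, 0)
-- ===== Notes on version B (the rewrite author's own statement) =====
-- stated objective: alternative
-- what changed: Instead of an iterative (left,right) binary search over A, B precomputes the difference array A[i]-i once and recurses on physical slices of it with an offset, deriving the midpoint from the segment length; same decision tree, entirely different state and traversal.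
import Mathlib
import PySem

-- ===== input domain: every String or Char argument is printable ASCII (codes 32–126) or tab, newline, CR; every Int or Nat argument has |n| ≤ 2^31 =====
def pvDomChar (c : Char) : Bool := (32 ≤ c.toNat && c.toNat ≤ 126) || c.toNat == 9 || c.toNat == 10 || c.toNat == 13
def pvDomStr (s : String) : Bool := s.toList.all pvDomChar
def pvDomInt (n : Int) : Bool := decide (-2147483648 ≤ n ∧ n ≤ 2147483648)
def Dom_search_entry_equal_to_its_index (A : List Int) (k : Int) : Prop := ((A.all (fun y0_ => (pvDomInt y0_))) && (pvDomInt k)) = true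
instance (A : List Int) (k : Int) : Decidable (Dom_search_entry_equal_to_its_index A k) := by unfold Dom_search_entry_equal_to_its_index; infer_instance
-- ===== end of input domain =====

-- B replaces the iterative (left,right) binary search with recursion on slices of
-- a precomputed difference array A[i]-i, carrying an offset; same results, different state.


-- ===== PORT A =====
-- while-loop of A as recursion over the loop state (left, right); the Nat fuel only
-- makes the recursion structural — with fuel > right+1-left it is never exhausted
def pvLoopA (A : List Int) : Nat → Int → Int → Int
  | 0, _, _ => -1
  | fuel + 1, left, right =>
    if left ≤ right then
      let mid := PySem.Int.floordiv (left + right) 2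
      let difference := (PySem.List.pyGet? A mid).getD 0 - mid
      if difference = 0 then mid
      else if difference > 0 then pvLoopA A fuel left (mid - 1)
      else pvLoopA A fuel (mid + 1) right
    else -1

def search_entry_equal_to_its_index (A : List Int) (k : Int) : Int :=
  pvLoopA A (A.length + 1) 0 ((A.length : Int) - 1)

-- ===== PORT B =====
-- the comprehension [a - i for i, a in enumerate(A)]
def pvDiffsB (A : List Int) : List Int :=
  (PySem.List.enumerate A).map (fun p => p.2 - p.1)

-- B's inner helper go(seg, offset): recursion on a slice of the difference array;
-- the Nat fuel only makes the recursion structural (fuel > len(seg) is never exhausted)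
def pvGoB : Nat → List Int → Int → Int
  | 0, _, _ => -1
  | fuel + 1, seg, offset =>
    if seg.isEmpty then -1
    else
      let m := PySem.Int.floordiv ((seg.length : Int) - 1) 2
      let d := (PySem.List.pyGet? seg m).getD 0
      if d = 0 then offset + m
      else if d > 0 then pvGoB fuel (PySem.List.slice seg none (some m)) offset
      else pvGoB fuel (PySem.List.slice seg (some (m + 1)) none) (offset + m + 1)

def search_entry_equal_to_its_index_alt (A : List Int) (k : Int) : Int :=
  pvGoB (A.length + 1) (pvDiffsB A) 0

-- ===== PRECONDITION & SPEC =====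
def Spec_search_entry_equal_to_its_index (A : List Int) (k : Int) (out : Int) : Prop := out = search_entry_equal_to_its_index_alt A k
instance (A : List Int) (k : Int) (out : Int) : Decidable (Spec_search_entry_equal_to_its_index A k out) := by unfold Spec_search_entry_equal_to_its_index; infer_instance

-- ===== CLAIM (what is proved, stated in full; the proofs are below) =====
def Claim_equal_search_entry_equal_to_its_index : Prop := ∀ (A : List Int) (k : Int), Dom_search_entry_equal_to_its_index A k → Spec_search_entry_equal_to_its_index A k (search_entry_equal_to_its_index A k)

-- ===== LEMMAS AND PROOFS =====
theorem pv_midB_eq (n : Nat) (h : 0 < n) :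
    PySem.Int.floordiv ((n : Int) - 1) 2 = (((n - 1) / 2 : Nat) : Int) := by
  rw [show ((n : Nat) : Int) - 1 = (((n - 1 : Nat)) : Int) by omega]
  exact_mod_cast PySem.Int.floordiv_natCast (n - 1) 2

theorem pvDiffsB_length (A : List Int) : (pvDiffsB A).length = A.length := by
  simp [pvDiffsB, PySem.List.length_enumerate]

theorem pvDiffsB_getElem? (A : List Int) (j : Nat) (hj : j < A.length) :
    (pvDiffsB A)[j]? = some (A[j] - (j : Int)) := by
  rw [List.getElem?_eq_getElem (by rw [pvDiffsB_length]; exact hj)]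
  simp [pvDiffsB, PySem.List.getElem_enumerate]

-- invariant: the loop on [l, r] equals go on the corresponding slice of diffs with
-- offset l, for any sufficient fuels
theorem pvLoopA_eq_pvGoB (A : List Int) :
    ∀ (n fa fb : Nat) (l r : Int), (r + 1 - l).toNat = n → n < fa → n < fb →
    0 ≤ l → r ≤ (A.length : Int) - 1 →
    pvLoopA A fa l r = pvGoB fb (((pvDiffsB A).drop l.toNat).take n) l := by
  intro n
  induction n using Nat.strong_induction_on with
  | _ n ih =>
    intro fa fb l r hn hfa hfb hl hr
    obtain ⟨fa', rfl⟩ : ∃ fa', fa = fa' + 1 := ⟨fa - 1, by omega⟩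
    obtain ⟨fb', rfl⟩ : ∃ fb', fb = fb' + 1 := ⟨fb - 1, by omega⟩
    by_cases hlr : l ≤ r
    · -- nonempty interval
      have hn1 : 1 ≤ n := by omega
      have hlen : ((pvDiffsB A).drop l.toNat).length = A.length - l.toNat := by
        simp [pvDiffsB_length]
      have hnle : n ≤ A.length - l.toNat := by omega
      set seg := ((pvDiffsB A).drop l.toNat).take n with hseg
      have hseglen : seg.length = n := by
        rw [hseg, List.length_take, hlen]; omega
      have hsegne : ¬ seg.isEmpty := by
        rw [List.isEmpty_iff]
        intro e
        rw [e] at hseglen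
        simp at hseglen
        omega
      -- midpoints
      set mN : Nat := (n - 1) / 2 with hmN
      have hmid : PySem.Int.floordiv (l + r) 2 = l + (mN : Int) := by
        have h2 : (0:Int) < 2 := by norm_num
        have hq := pv_midB_eq n (by omega)
        rw [PySem.Int.floordiv_eq_ediv_of_pos h2] at hq ⊢
        omega
      have hmltn : mN < n := by omega
      have hj : l.toNat + mN < A.length := by omega
      -- the common difference value at the midpoint
      set D : Int := A[l.toNat + mN]'hj - (l + (mN : Int)) with hD
      have hsome : seg[mN]? = some D := by
        rw [hseg, List.getElem?_take_of_lt hmltn, List.getElem?_drop,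
          pvDiffsB_getElem? A (l.toNat + mN) hj, hD]
        congr 2
        push_cast; omega
      have hAdiff : (PySem.List.pyGet? A (l + (mN : Int))).getD 0 - (l + (mN : Int)) = D := by
        rw [PySem.List.pyGet?_of_nonneg A (i := l + (mN : Int)) (by omega)]
        rw [show (l + (mN : Int)).toNat = l.toNat + mN by omega]
        rw [List.getElem?_eq_getElem hj, hD]
        rfl
      have hBd : (PySem.List.pyGet? seg ((mN : Int))).getD 0 = D := by
        rw [PySem.List.pyGet?_natCast, hsome]
        rfl
      -- unfold one step of each side
      rw [pvLoopA, pvGoB, if_pos hlr, if_neg hsegne]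
      simp only [hseglen, pv_midB_eq n (by omega), ← hmN, hmid, hAdiff, hBd]
      by_cases h0 : D = 0
      · rw [if_pos h0, if_pos h0]
      · rw [if_neg h0, if_neg h0]
        by_cases hp : D > 0
        · rw [if_pos hp, if_pos hp]
          -- left recursion: seg[:m] is the slice for [l, mid-1]
          have hslice : PySem.List.slice seg none (some ((mN : Int))) =
              ((pvDiffsB A).drop l.toNat).take mN := by
            rw [PySem.List.slice_to_natCast, hseg, List.take_take]
            congr 1; omega
          rw [hslice]
          exact ih mN hmltn fa' fb' l (l + (mN : Int) - 1) (by omega) (by omega) (by omega)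
            hl (by omega)
        · rw [if_neg hp, if_neg hp]
          -- right recursion: seg[m+1:] is the slice for [mid+1, r]
          have hcast : ((mN : Int)) + 1 = (((mN + 1 : Nat)) : Int) := by push_cast; ring
          have hslice : PySem.List.slice seg (some ((mN : Int) + 1)) none =
              ((pvDiffsB A).drop (l + (mN : Int) + 1).toNat).take (n - (mN + 1)) := by
            rw [hcast, PySem.List.slice_from_natCast, hseg, List.drop_take, List.drop_drop]
            congr 2 <;> omega
          rw [hslice]
          exact ih (n - (mN + 1)) (by omega) fa' fb' (l + (mN : Int) + 1) r (by omega)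
            (by omega) (by omega) (by omega) hr
    · -- empty interval: n = 0
      have hn0 : n = 0 := by omega
      rw [pvLoopA, if_neg hlr, hn0]
      simp [pvGoB]

-- ===== VERDICT (by name: the statement is the Claim_ definition above) =====
theorem search_entry_equal_to_its_index_spec : Claim_equal_search_entry_equal_to_its_index := by
  intro A k _
  show _ = _
  unfold search_entry_equal_to_its_index search_entry_equal_to_its_index_alt
  have h := pvLoopA_eq_pvGoB A A.length (A.length + 1) (A.length + 1) 0
    ((A.length : Int) - 1) (by omega) (by omega) (by omega) (by omega) (by omega)
  have h2 : (pvDiffsB A).take A.length = pvDiffsB A := by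
    rw [← pvDiffsB_length A]; exact List.take_length
  simpa [h2] using h
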